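-- pv_equiv track=rewrite | github.com/allmeidaapedro/URI-Beecrowd-solutions-in-python | 1486.py | count_sticks
-- ===== SOURCE A (Python) =====
-- def count_sticks(transposed_matrix, minimum_length):
--
--     bigger = 0
--
--     for line in transposed_matrix:
--
--         count = 0
--
--         for i in range(len(line)):
--
--             if line[i] == 1:
--
--                 count += 1
--
--             else:
--
--                 if count >= minimum_length:
--
--                     bigger += 1
--
--                 count = 0
--
--         if count >= minimum_length:
--
--             bigger += 1
--
--     return bigger
-- ===== SOURCE B (Python) =====
-- def count_sticks(transposed_matrix, minimum_length):
--     total = 0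
--     for line in transposed_matrix:
--         s = ''.join('1' if x == 1 else '0' for x in line)
--         total += sum(1 for piece in s.split('0') if len(piece) >= minimum_length)
--     return total
-- ===== Notes on version B (the rewrite author's own statement) =====
-- stated objective: idiomatic
-- what changed: Replaces the hand-maintained run counter with a string encoding: each line is rendered as a '0'/'1' string, split on '0', and the pieces (one per inter-zero gap, including empty ones) whose length reaches minimum_length are counted.
import Mathlib
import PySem

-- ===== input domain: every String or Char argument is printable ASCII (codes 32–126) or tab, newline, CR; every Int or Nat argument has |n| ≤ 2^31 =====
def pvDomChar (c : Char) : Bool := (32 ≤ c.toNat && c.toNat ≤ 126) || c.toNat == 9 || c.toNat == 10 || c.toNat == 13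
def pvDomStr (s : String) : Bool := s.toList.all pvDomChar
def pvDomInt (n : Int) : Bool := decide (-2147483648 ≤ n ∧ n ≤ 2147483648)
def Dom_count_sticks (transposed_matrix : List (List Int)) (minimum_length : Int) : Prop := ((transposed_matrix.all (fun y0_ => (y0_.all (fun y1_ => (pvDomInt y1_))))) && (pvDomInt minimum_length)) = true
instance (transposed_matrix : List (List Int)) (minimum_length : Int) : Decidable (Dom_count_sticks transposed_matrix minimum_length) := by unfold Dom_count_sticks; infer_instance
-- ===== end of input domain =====

-- B changes the algorithm: each line is encoded as a '0'/'1' char string, split on '0',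
-- and pieces of length ≥ minimum_length are counted (objective: idiomatic; same cost).

-- ===== PORT A =====
-- state = (bigger, count); 'for i in range(len(line)): line[i]' → foldl over pyRange with
-- pyGetD (default never used: every index produced by the range is in bounds).
def count_sticks (transposed_matrix : List (List Int)) (minimum_length : Int) : Int :=
  transposed_matrix.foldl
    (fun bigger line =>
      let p : Int × Int :=
        (PySem.List.pyRange 0 (PySem.List.len line) 1).foldl
          (fun (s : Int × Int) i =>
            if PySem.List.pyGetD line i 0 = 1 then (s.1, s.2 + 1)
            else (if minimum_length ≤ s.2 then s.1 + 1 else s.1, 0))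
          (bigger, 0)
      if minimum_length ≤ p.2 then p.1 + 1 else p.1)
    0

-- ===== PORT B =====
-- ''.join('1' if x == 1 else '0' for x in line) → Chars.join of singleton char lists;
-- s.split('0') → Chars.splitOn; sum(1 for … if …) → length of filter.
def count_sticks_alt (transposed_matrix : List (List Int)) (minimum_length : Int) : Int :=
  transposed_matrix.foldl
    (fun total line =>
      let s : List Char :=
        PySem.Chars.join [] (line.map (fun x => [if x == 1 then '1' else '0']))
      total +
        (((PySem.Chars.splitOn s ['0']).filter
            (fun piece => minimum_length ≤ (piece.length : Int))).length : Int))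
    0

-- ===== PRECONDITION & SPEC =====
def Spec_count_sticks (transposed_matrix : List (List Int)) (minimum_length : Int) (out : Int) : Prop := out = count_sticks_alt transposed_matrix minimum_length
instance (transposed_matrix : List (List Int)) (minimum_length : Int) (out : Int) : Decidable (Spec_count_sticks transposed_matrix minimum_length out) := by unfold Spec_count_sticks; infer_instance

-- ===== CLAIM (what is proved, stated in full; the proofs are below) =====
def Claim_equal_count_sticks : Prop := ∀ (transposed_matrix : List (List Int)) (minimum_length : Int), Dom_count_sticks transposed_matrix minimum_length → Spec_count_sticks transposed_matrix minimum_length (count_sticks transposed_matrix minimum_length)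

-- ===== LEMMAS AND PROOFS =====

-- Reference form of splitOn with the one-char separator '0' (fuel-free).
def pvPieces : List Char → List Char → List (List Char)
  | [], cur => [cur.reverse]
  | c :: rest, cur =>
      if c = '0' then cur.reverse :: pvPieces rest [] else pvPieces rest (c :: cur)

lemma pvGo_eq_pieces (l : List Char) : ∀ (fuel : Nat) (cur : List Char) (acc : List (List Char)),
    l.length < fuel →
    PySem.Chars.splitOn.go ['0'] fuel l cur acc = acc.reverse ++ pvPieces l cur := by
  induction l with
  | nil =>
      intro fuel cur acc h
      cases fuel with
      | zero => omega
      | succ f => simp [PySem.Chars.splitOn.go, pvPieces]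
  | cons c rest ih =>
      intro fuel cur acc h
      cases fuel with
      | zero => simp at h
      | succ f =>
        by_cases hc : c = '0'
        · subst hc
          rw [show PySem.Chars.splitOn.go ['0'] (f+1) ('0' :: rest) cur acc
              = PySem.Chars.splitOn.go ['0'] f rest [] (cur.reverse :: acc) by
            simp [PySem.Chars.splitOn.go, List.isPrefixOf]]
          rw [ih f [] _ (by simpa using h)]
          simp [pvPieces]
        · rw [show PySem.Chars.splitOn.go ['0'] (f+1) (c :: rest) cur acc
              = PySem.Chars.splitOn.go ['0'] f rest (c :: cur) acc by
            simp [PySem.Chars.splitOn.go, List.isPrefixOf, beq_iff_eq, Ne.symm hc]]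
          rw [ih f _ _ (by simpa using h)]
          simp [pvPieces, hc]

lemma pvSplitOn_eq (s : List Char) : PySem.Chars.splitOn s ['0'] = pvPieces s [] := by
  have := pvGo_eq_pieces s (s.length + 1) [] [] (by omega)
  simpa [PySem.Chars.splitOn] using this

-- the per-element encoding used by B
def pvRep (x : Int) : Char := if x == 1 then '1' else '0'

-- The inner loop of A (over the line's elements, after foldl_pyRange_zero_pyGetD) computes
-- exactly the number of good pieces B's split finds; 'cur' holds the current run as chars.
lemma pvLine_key (m : Int) (line : List Int) :
    ∀ (b : Int) (cur : List Char),
    (let p := line.foldl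
        (fun (s : Int × Int) x =>
          if x = 1 then (s.1, s.2 + 1)
          else (if m ≤ s.2 then s.1 + 1 else s.1, 0)) (b, (cur.length : Int));
      if m ≤ p.2 then p.1 + 1 else p.1)
    = b + (((pvPieces (line.map pvRep) cur).filter
            (fun piece => m ≤ (piece.length : Int))).length : Int) := by
  induction line with
  | nil =>
      intro b cur
      by_cases h : m ≤ (cur.length : Int) <;> simp [pvPieces, h]
  | cons x rest ih =>
      intro b cur
      by_cases hx : x = 1
      · subst hx
        have h1 : pvRep 1 = '1' := rfl
        have := ih b ('1' :: cur)
        simp only [List.foldl_cons, List.map_cons, h1]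
        simpa [pvPieces] using this
      · have h0 : pvRep x = '0' := by simp [pvRep, hx]
        have := ih (if m ≤ (cur.length : Int) then b + 1 else b) []
        simp only [List.foldl_cons, if_neg hx, List.map_cons, h0]
        by_cases h : m ≤ (cur.length : Int) <;>
          simpa [pvPieces, h, add_comm, add_left_comm, add_assoc] using this

-- per-line step of B, rewritten through the lemmas above
lemma pvStep_eq (m : Int) (line : List Int) (b : Int) :
    (let p : Int × Int :=
        (PySem.List.pyRange 0 (PySem.List.len line) 1).foldl
          (fun (s : Int × Int) i =>
            if PySem.List.pyGetD line i 0 = 1 then (s.1, s.2 + 1)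
            else (if m ≤ s.2 then s.1 + 1 else s.1, 0))
          (b, 0)
      if m ≤ p.2 then p.1 + 1 else p.1)
    = b +
      (((PySem.Chars.splitOn
            (PySem.Chars.join [] (line.map (fun x => [if x == 1 then '1' else '0'])))
            ['0']).filter
          (fun piece => m ≤ (piece.length : Int))).length : Int) := by
  have hjoin : PySem.Chars.join [] (line.map (fun x => [if x == 1 then '1' else '0']))
      = line.map pvRep := by
    have : line.map (fun x => [if x == 1 then '1' else '0'])
        = (line.map pvRep).map (fun c => [c]) := by
      rw [List.map_map]; rfl
    rw [this, PySem.Chars.join_nil_singletons]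
  rw [hjoin, pvSplitOn_eq]
  have hfold := PySem.List.foldl_pyRange_zero_pyGetD line 0
      (fun (s : Int × Int) x =>
        if x = 1 then (s.1, s.2 + 1)
        else (if m ≤ s.2 then s.1 + 1 else s.1, 0)) (b, 0)
  simp only [PySem.List.len] at hfold ⊢
  rw [hfold]
  have := pvLine_key m line b []
  simpa using this

lemma pvFold_eq (m : Int) (tm : List (List Int)) : ∀ (acc : Int),
    tm.foldl
      (fun bigger line =>
        let p : Int × Int :=
          (PySem.List.pyRange 0 (PySem.List.len line) 1).foldl
            (fun (s : Int × Int) i =>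
              if PySem.List.pyGetD line i 0 = 1 then (s.1, s.2 + 1)
              else (if m ≤ s.2 then s.1 + 1 else s.1, 0))
            (bigger, 0)
        if m ≤ p.2 then p.1 + 1 else p.1) acc
    = tm.foldl
      (fun total line =>
        total +
          (((PySem.Chars.splitOn
                (PySem.Chars.join [] (line.map (fun x => [if x == 1 then '1' else '0'])))
                ['0']).filter
              (fun piece => m ≤ (piece.length : Int))).length : Int)) acc := by
  induction tm with
  | nil => intro acc; rfl
  | cons line rest ih =>
      intro acc
      rw [List.foldl_cons, List.foldl_cons, ih]
      congr 1
      exact pvStep_eq m line acc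

-- ===== VERDICT (by name: the statement is the Claim_ definition above) =====
theorem count_sticks_spec : Claim_equal_count_sticks := by
  intro tm m _
  show count_sticks tm m = count_sticks_alt tm m
  unfold count_sticks count_sticks_alt
  exact pvFold_eq m tm 0
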